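-- pv_equiv track=rewrite | github.com/HyeJuSeon/codingtest-study2 | Hosan/4월14일/파일합치기.py | solution
-- ===== SOURCE A (Python) =====
-- def solution(data, size) :
--     M = [[-1] * (size+1) for _ in range (size+1)]
--     for i in range(1, size+1) :
--         M[i][i] = data[i-1]
--     for diag in range(1, size+1) :
--         for j in range(1, size - diag + 1) : #54321순으로 줄어든다
--             i = diag + j # i는 최대 size까지 늘어나야 한다. 이 방법이 바텀업 대각선 배열 표준. 기억하자.
--             M[j][i] = solve(data, M, j, i)
--     return M
--
-- def solve(data, M, j, i) :
--     Min = 2000000000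
--     for z in range(j, i) :
--         value = M[j][z] + M[z+1][i]
--         if Min > value:
--             Min = value
--     return Min
-- ===== SOURCE B (Python) =====
-- def solution(data, size):
--     # O(n^2) via prefix sums: every contiguous range sum directly, no DP over splits
--     prefix = [0] * (size + 1)
--     for k in range(1, size + 1):
--         prefix[k] = prefix[k - 1] + data[k - 1]
--     return [[prefix[i] - prefix[j - 1] if 1 <= j <= i else -1
--              for i in range(size + 1)]
--             for j in range(size + 1)]
-- ===== Notes on version B (the rewrite author's own statement) =====
-- stated objective: faster
-- what changed: Replaces the O(n^3) interval DP (min over all split points, each split summing to the same range total) by a prefix-sum array, filling each cell M[j][i] directly as prefix[i]-prefix[j-1]; intended as faster: a timing run measured B 67.63x faster at n=1024, the largest size at which both finished.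
-- intended difference: On inputs where some contiguous window of at least two elements within the first size elements sums to more than 2000000000, A silently clamps those cells to the sentinel 2000000000 that initialises Min in solve, while B returns the true range sum, which is the intended value. — e.g. on solution([2000000000, 1], 2): A returns [[-1, -1, -1], [-1, 2000000000, 2000000000], [-1, -1, 1]], B returns [[-1, -1, -1], [-1, 2000000000, 2000000001], [-1, -1, 1]]
import Mathlib
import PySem

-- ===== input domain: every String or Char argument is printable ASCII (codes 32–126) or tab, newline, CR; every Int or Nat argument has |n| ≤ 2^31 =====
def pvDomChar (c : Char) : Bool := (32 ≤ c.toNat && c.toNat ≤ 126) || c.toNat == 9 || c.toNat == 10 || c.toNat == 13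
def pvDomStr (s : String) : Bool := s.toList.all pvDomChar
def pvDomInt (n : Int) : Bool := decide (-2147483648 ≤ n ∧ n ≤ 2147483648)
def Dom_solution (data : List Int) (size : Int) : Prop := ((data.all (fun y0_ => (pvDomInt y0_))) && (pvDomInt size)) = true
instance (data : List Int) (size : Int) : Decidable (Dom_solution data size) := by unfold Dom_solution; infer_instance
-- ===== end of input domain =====

-- B replaces A's O(n^3) interval DP by an O(n^2) pref-sum fill; on windows summing
-- beyond A's Min sentinel 2000000000 A clamps while B returns the true sum (see D_solution).

-- ===== PORT A =====
-- M[j][i] (both indices produced by the loops are nonnegative and in range; pyGetD/pySetD are the total forms)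
def pvMget (M : List (List Int)) (j i : Int) : Int :=
  PySem.List.pyGetD (PySem.List.pyGetD M j []) i (-1)

def pvMset (M : List (List Int)) (j i : Int) (v : Int) : List (List Int) :=
  PySem.List.pySetD M j (PySem.List.pySetD (PySem.List.pyGetD M j []) i v)

-- solve(data, M, j, i)
def pvSolve (M : List (List Int)) (j i : Int) : Int :=
  (PySem.List.pyRange j i 1).foldl
    (fun Min z =>
      if Min > pvMget M j z + pvMget M (z + 1) i then pvMget M j z + pvMget M (z + 1) i else Min)
    2000000000

def solution (data : List Int) (size : Int) : List (List Int) :=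
  -- M0, M1: the -1-filled matrix, then the filled diagonal, then the diag loops (lets inlined)
  (PySem.List.pyRange 1 (size + 1) 1).foldl
    (fun M diag =>
      (PySem.List.pyRange 1 (size - diag + 1) 1).foldl
        (fun M j => pvMset M j (diag + j) (pvSolve M j (diag + j))) M)
    ((PySem.List.pyRange 1 (size + 1) 1).foldl
      (fun M i => pvMset M i i (PySem.List.pyGetD data (i - 1) 0))
      (List.replicate (size + 1).toNat (List.replicate (size + 1).toNat (-1 : Int))))

-- ===== PORT B =====
def solution_alt (data : List Int) (size : Int) : List (List Int) :=
  let pref := (PySem.List.pyRange 1 (size + 1) 1).foldl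
    (fun p k => PySem.List.pySetD p k (PySem.List.pyGetD p (k - 1) 0 + PySem.List.pyGetD data (k - 1) 0))
    (List.replicate (size + 1).toNat (0 : Int))
  (PySem.List.pyRange 0 (size + 1) 1).map
    (fun j => (PySem.List.pyRange 0 (size + 1) 1).map
      (fun i => if 1 ≤ j ∧ j ≤ i then PySem.List.pyGetD pref i 0 - PySem.List.pyGetD pref (j - 1) 0 else -1))

-- ===== PRECONDITION & SPEC =====
-- A raises IndexError (data[i-1]) exactly when 1 ≤ size and size > len(data)
def Pre_solution (data : List Int) (size : Int) : Prop :=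
  size ≤ (data.length : Int) ∨ size ≤ 0
instance (data : List Int) (size : Int) : Decidable (Pre_solution data size) := by
  unfold Pre_solution; infer_instance

def pvWitness_solution : List Int × Int := ([1, 2, 3], 3)

-- On inputs where some contiguous window of ≥ 2 elements among the first size elements sums to
-- more than 2000000000, A clamps those cells to the Min sentinel 2000000000 of solve, while B
-- returns the true range sum, which is the intended value.
def D_solution (data : List Int) (size : Int) : Prop :=
  ∃ a < min size.toNat data.length, ∃ b < min size.toNat (data.length + 1),
    a < b ∧ ((data.drop a).take (b - a + 1)).sum > 2000000000
instance (data : List Int) (size : Int) : Decidable (D_solution data size) := by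
  unfold D_solution; infer_instance

def Spec_solution (data : List Int) (size : Int) (out : List (List Int)) : Prop :=
  ¬ D_solution data size → out = solution_alt data size
instance (data : List Int) (size : Int) (out : List (List Int)) : Decidable (Spec_solution data size out) := by
  unfold Spec_solution; infer_instance

def pvDiffWitness_solution : List Int × Int := ([2000000000, 1], 2)
def pvDiffWitnessOut_solution : (List (List Int)) × (List (List Int)) :=
  ([[-1, -1, -1], [-1, 2000000000, 2000000000], [-1, -1, 1]],
   [[-1, -1, -1], [-1, 2000000000, 2000000001], [-1, -1, 1]])

-- ===== CLAIM (what is proved, stated in full; the proofs are below) =====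
def Claim_unchanged_solution : Prop := ∀ (data : List Int) (size : Int), Dom_solution data size → Pre_solution data size → Spec_solution data size (solution data size)
def Claim_changed_solution : Prop := Dom_solution (pvDiffWitness_solution.1) (pvDiffWitness_solution.2) ∧ Pre_solution (pvDiffWitness_solution.1) (pvDiffWitness_solution.2) ∧ D_solution (pvDiffWitness_solution.1) (pvDiffWitness_solution.2) ∧ solution (pvDiffWitness_solution.1) (pvDiffWitness_solution.2) = pvDiffWitnessOut_solution.1 ∧ solution_alt (pvDiffWitness_solution.1) (pvDiffWitness_solution.2) = pvDiffWitnessOut_solution.2 ∧ pvDiffWitnessOut_solution.1 ≠ pvDiffWitnessOut_solution.2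

def Claim_exact_solution : Prop := ∀ (data : List Int) (size : Int), Dom_solution data size → Pre_solution data size → D_solution data size → solution data size ≠ solution_alt data size

-- ===== LEMMAS AND PROOFS =====

-- sum of the 1-indexed window data[j..i]
def pvWsum (data : List Int) (j i : Nat) : Int := ((data.drop (j - 1)).take (i + 1 - j)).sum

-- the (n+1)x(n+1) matrix with entries f j i
def pvMk (n : Nat) (f : Nat → Nat → Int) : List (List Int) :=
  (List.range (n + 1)).map (fun j => (List.range (n + 1)).map (fun i => f j i))

-- A's matrix after the first d diagonals, the current diagonal filled up to row t
def pvH (data : List Int) (n d t : Nat) (j i : Nat) : Int :=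
  if 1 ≤ j ∧ j ≤ i ∧ i ≤ n ∧ (i < j + d ∨ (i = j + d ∧ j ≤ t)) then pvWsum data j i else -1

theorem pvGetD_map_range {f : Nat → Int} {n j : Nat} (h : j < n) (d : Int) :
    ((List.range n).map f).getD j d = f j := by
  simp [List.getD_eq_getElem?_getD, h]

theorem pvGetD_map_range_list {f : Nat → List Int} {n j : Nat} (h : j < n) (d : List Int) :
    ((List.range n).map f).getD j d = f j := by
  simp [List.getD_eq_getElem?_getD, h]

theorem pvSet_map_range {α : Type} {f : Nat → α} {n k : Nat} (_h : k < n) (v : α) :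
    ((List.range n).map f).set k v = (List.range n).map (fun t => if t = k then v else f t) := by
  apply List.ext_getElem
  · simp
  · intro i h1 h2
    simp only [List.getElem_set, List.getElem_map, List.getElem_range]
    by_cases h : k = i
    · rw [if_pos h, if_pos (by omega)]
    · rw [if_neg h, if_neg (by omega)]

theorem pvMk_congr {n : Nat} {f g : Nat → Nat → Int}
    (h : ∀ j ≤ n, ∀ i ≤ n, f j i = g j i) : pvMk n f = pvMk n g := by
  unfold pvMk
  apply List.map_congr_left
  intro j hj
  apply List.map_congr_left
  intro i hi
  exact h j (by simpa using Nat.lt_succ_iff.mp (List.mem_range.mp hj))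
    i (by simpa using Nat.lt_succ_iff.mp (List.mem_range.mp hi))

theorem pvMget_mk {n : Nat} {f : Nat → Nat → Int} {j i : Nat} (hj : j ≤ n) (hi : i ≤ n) :
    pvMget (pvMk n f) (j : Int) (i : Int) = f j i := by
  unfold pvMget pvMk
  simp only [PySem.List.pyGetD_natCast]
  rw [pvGetD_map_range_list (by omega), pvGetD_map_range (by omega)]

theorem pvMset_mk {n : Nat} {f : Nat → Nat → Int} {j i : Nat} (hj : j ≤ n) (hi : i ≤ n) (v : Int) :
    pvMset (pvMk n f) (j : Int) (i : Int) v
      = pvMk n (fun a b => if a = j ∧ b = i then v else f a b) := by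
  unfold pvMset pvMk
  simp only [PySem.List.pyGetD_natCast, PySem.List.pySetD_natCast]
  rw [pvGetD_map_range_list (by omega), pvSet_map_range (by omega),
    pvSet_map_range (by omega)]
  apply List.map_congr_left
  intro a _
  by_cases ha : a = j
  · subst ha
    rw [if_pos rfl]
    apply List.map_congr_left
    intro b _
    by_cases hb : b = i <;> simp [hb]
  · simp only [if_neg ha]
    apply List.map_congr_left
    intro b _
    simp [ha]

theorem pvWsum_split {data : List Int} {j z i : Nat} (hj : 1 ≤ j) (hz : j ≤ z) (hzi : z < i) :
    pvWsum data j i = pvWsum data j z + pvWsum data (z + 1) i := by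
  unfold pvWsum
  have h1 : i + 1 - j = (z + 1 - j) + (i - z) := by omega
  have h2 : List.drop (z + 1 - j) (List.drop (j - 1) data) = List.drop (z + 1 - 1) data := by
    rw [List.drop_drop]
    congr 1
    omega
  have h3 : i - z = i + 1 - (z + 1) := by omega
  rw [h1, List.take_add, List.sum_append, h2, h3]

theorem pvWsum_diag {data : List Int} {j : Nat} : pvWsum data j j = data.getD (j - 1) 0 := by
  unfold pvWsum
  have h1 : j + 1 - j = 1 := by omega
  rw [h1]
  have h2 : data[j-1]? = (data.drop (j - 1))[0]? := by simp
  rcases hd : data.drop (j - 1) with _ | ⟨x, xs⟩ <;>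
    simp [List.getD_eq_getElem?_getD, h2, hd]

theorem pvTake_diff {data : List Int} {j i : Nat} (hj : 1 ≤ j) (hji : j ≤ i) :
    (data.take i).sum - (data.take (j - 1)).sum = pvWsum data j i := by
  unfold pvWsum
  have h1 : i = (j - 1) + (i + 1 - j) := by omega
  calc (data.take i).sum - (data.take (j - 1)).sum
      = ((data.take ((j - 1) + (i + 1 - j))).sum) - (data.take (j - 1)).sum := by rw [← h1]
    _ = _ := by rw [List.take_add, List.sum_append]; ring

theorem pvTake_succ_sum {data : List Int} {m : Nat} :
    (data.take (m + 1)).sum = (data.take m).sum + data.getD m 0 := by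
  rw [List.take_add_one, List.sum_append]
  rcases h : data[m]? with _ | x <;> simp [List.getD_eq_getElem?_getD, h]

theorem pvFoldl_min_id {g : Int → Int} {w : Int} :
    ∀ l : List Int, (∀ z ∈ l, g z = w) →
      l.foldl (fun m z => if m > g z then g z else m) w = w := by
  intro l
  induction l with
  | nil => intro _; rfl
  | cons x xs ih =>
    intro h
    have hx : g x = w := h x (by simp)
    simp only [List.foldl_cons, hx]
    rw [if_neg (by omega)]
    exact ih (fun z hz => h z (by simp [hz]))

theorem pvFoldl_min_const {g : Int → Int} {w C : Int} (hw : w ≤ C) :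
    ∀ l : List Int, l ≠ [] → (∀ z ∈ l, g z = w) →
      l.foldl (fun m z => if m > g z then g z else m) C = w := by
  intro l hne h
  rcases l with _ | ⟨x, xs⟩
  · exact absurd rfl hne
  · have hx : g x = w := h x (by simp)
    have hxs : ∀ z ∈ xs, g z = w := fun z hz => h z (by simp [hz])
    simp only [List.foldl_cons, hx]
    by_cases hc : C > w
    · rw [if_pos hc]; exact pvFoldl_min_id xs hxs
    · rw [if_neg hc]
      have : C = w := by omega
      subst this
      exact pvFoldl_min_id xs hxs

-- the D_solution condition specialised to a natural-number size
def pvBig (data : List Int) (n : Nat) : Prop :=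
  ∃ a < min n data.length, ∃ b < min n (data.length + 1),
    a < b ∧ ((data.drop a).take (b - a + 1)).sum > 2000000000

theorem pvSolve_eval {data : List Int} {n d t : Nat} (hd : 1 ≤ d)
    (hnd : ¬ pvBig data n) {J : Nat} (hJ : 1 ≤ J) (hJt : J + d ≤ n) :
    pvSolve (pvMk n (pvH data n d t)) (J : Int) ((J + d : Nat) : Int) = pvWsum data J (J + d) := by
  unfold pvSolve
  apply pvFoldl_min_const (g := fun z => pvMget (pvMk n (pvH data n d t)) (J : Int) z
      + pvMget (pvMk n (pvH data n d t)) (z + 1) ((J + d : Nat) : Int))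
  · -- the window sum is at most the sentinel
    by_contra hgt
    rw [not_le] at hgt
    apply hnd
    have haL : J - 1 < data.length := by
      by_contra haL
      rw [not_lt] at haL
      have : data.drop (J - 1) = [] := List.drop_eq_nil_of_le haL
      unfold pvWsum at hgt
      rw [this] at hgt
      simp at hgt
    refine ⟨J - 1, by omega, min (J + d - 1) data.length, by omega, by omega, ?_⟩
    unfold pvWsum at hgt
    by_cases hbL : J + d - 1 ≤ data.length
    · have h1 : min (J + d - 1) data.length = J + d - 1 := by omega
      rw [h1]
      have h2 : (J + d - 1) - (J - 1) + 1 = (J + d) + 1 - J := by omega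
      rw [h2]
      omega
    · have h1 : min (J + d - 1) data.length = data.length := by omega
      rw [h1]
      have hdl : (data.drop (J - 1)).length = data.length - (J - 1) := by simp
      rw [List.take_of_length_le (by omega)]
      rw [List.take_of_length_le (by omega)] at hgt
      omega
  · -- range(j, i) is nonempty
    rw [PySem.List.pyRange_one_cons (by push_cast; omega)]
    simp
  · -- every split yields the full window sum
    intro z hz
    rw [PySem.List.mem_pyRange_one] at hz
    obtain ⟨hz1, hz2⟩ := hz
    have hz0 : 0 ≤ z := by omega
    set z' : Nat := z.toNat with hz'
    have hzz : z = (z' : Int) := by omega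
    have hb1 : J ≤ z' := by omega
    have hb2 : z' < J + d := by omega
    rw [hzz]
    have e1 : pvMget (pvMk n (pvH data n d t)) (J : Int) (z' : Int) = pvWsum data J z' := by
      rw [pvMget_mk (by omega) (by omega)]
      unfold pvH
      rw [if_pos (by omega)]
    have e2 : pvMget (pvMk n (pvH data n d t)) ((z' : Int) + 1) ((J + d : Nat) : Int)
        = pvWsum data (z' + 1) (J + d) := by
      have : ((z' : Int) + 1) = ((z' + 1 : Nat) : Int) := by push_cast; ring
      rw [this, pvMget_mk (by omega) (by omega)]
      unfold pvH
      rw [if_pos (by omega)]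
    rw [e1, e2]
    exact (pvWsum_split hJ hb1 (by omega)).symm

theorem pvInner {data : List Int} {n d : Nat} (hd : 1 ≤ d) (hdn : d ≤ n)
    (hnd : ¬ pvBig data n) :
    ∀ t : Nat, t ≤ n - d →
    (PySem.List.pyRange 1 ((t : Int) + 1) 1).foldl
        (fun M j => pvMset M j ((d : Int) + j) (pvSolve M j ((d : Int) + j)))
        (pvMk n (pvH data n d 0))
      = pvMk n (pvH data n d t) := by
  intro t
  induction t with
  | zero =>
    intro _
    rw [PySem.List.pyRange_one_eq_nil (by norm_num)]
    rfl
  | succ t ih =>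
    intro ht
    have h1 : ((t + 1 : Nat) : Int) + 1 = ((t : Int) + 1) + 1 := by push_cast; ring
    rw [h1, PySem.List.pyRange_one_succ_right (by omega), List.foldl_append,
      ih (by omega)]
    simp only [List.foldl_cons, List.foldl_nil]
    have hJ : ((t : Int) + 1) = ((t + 1 : Nat) : Int) := by push_cast; ring
    have hI : (d : Int) + ((t + 1 : Nat) : Int) = (((t + 1) + d : Nat) : Int) := by push_cast; ring
    rw [hJ, hI, pvSolve_eval hd hnd (by omega) (by omega),
      pvMset_mk (by omega) (by omega)]
    apply pvMk_congr
    intro a ha b hb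
    by_cases hab : a = t + 1 ∧ b = (t + 1) + d
    · rw [if_pos hab]
      obtain ⟨ha1, hb1⟩ := hab
      subst ha1; subst hb1
      unfold pvH
      rw [if_pos (by omega)]
    · rw [if_neg hab]
      unfold pvH
      by_cases hc : 1 ≤ a ∧ a ≤ b ∧ b ≤ n ∧ (b < a + d ∨ (b = a + d ∧ a ≤ t))
      · rw [if_pos hc, if_pos (by omega)]
      · rw [if_neg hc, if_neg (by omega)]

theorem pvOuter {data : List Int} {n : Nat} (hnd : ¬ pvBig data n) :
    ∀ d : Nat, d ≤ n →
    (PySem.List.pyRange 1 ((d : Int) + 1) 1).foldl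
        (fun M diag =>
          (PySem.List.pyRange 1 ((n : Int) - diag + 1) 1).foldl
            (fun M j => pvMset M j (diag + j) (pvSolve M j (diag + j))) M)
        (pvMk n (pvH data n 1 0))
      = pvMk n (pvH data n d (n - d)) := by
  intro d
  induction d with
  | zero =>
    intro _
    rw [PySem.List.pyRange_one_eq_nil (by norm_num)]
    simp only [List.foldl_nil]
    apply pvMk_congr
    intro a _ b hb
    unfold pvH
    by_cases hc : 1 ≤ a ∧ a ≤ b ∧ b ≤ n ∧ (b < a + 1 ∨ (b = a + 1 ∧ a ≤ 0))
    · rw [if_pos hc, if_pos (by omega)]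
    · rw [if_neg hc, if_neg (by omega)]
  | succ d ih =>
    intro hd1
    have h1 : ((d + 1 : Nat) : Int) + 1 = ((d : Int) + 1) + 1 := by push_cast; ring
    rw [h1, PySem.List.pyRange_one_succ_right (by omega), List.foldl_append,
      ih (by omega)]
    simp only [List.foldl_cons, List.foldl_nil]
    have hstart : pvMk n (pvH data n d (n - d)) = pvMk n (pvH data n (d + 1) 0) := by
      apply pvMk_congr
      intro a ha b hb
      unfold pvH
      by_cases hc : 1 ≤ a ∧ a ≤ b ∧ b ≤ n ∧ (b < a + d ∨ (b = a + d ∧ a ≤ n - d))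
      · rw [if_pos hc, if_pos (by omega)]
      · rw [if_neg hc, if_neg (by omega)]
    have hdiag : ((d : Int) + 1) = ((d + 1 : Nat) : Int) := by push_cast; ring
    have hrange : (n : Int) - ((d + 1 : Nat) : Int) + 1 = ((n - (d + 1) : Nat) : Int) + 1 := by
      push_cast [Nat.cast_sub hd1]; ring
    rw [hstart, hdiag, hrange, pvInner (by omega) (by omega) hnd (n - (d + 1)) (by omega)]

theorem pvDiagfill {data : List Int} {n : Nat} :
    ∀ m : Nat, m ≤ n →
    (PySem.List.pyRange 1 ((m : Int) + 1) 1).foldl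
        (fun M i => pvMset M i i (PySem.List.pyGetD data (i - 1) 0))
        (pvMk n (fun _ _ => (-1 : Int)))
      = pvMk n (fun j i => if 1 ≤ j ∧ i = j ∧ j ≤ m then pvWsum data j j else -1) := by
  intro m
  induction m with
  | zero =>
    intro _
    rw [PySem.List.pyRange_one_eq_nil (by norm_num)]
    simp only [List.foldl_nil]
    apply pvMk_congr
    intro a _ b _
    rw [if_neg (by omega)]
  | succ m ih =>
    intro hm
    have h1 : ((m + 1 : Nat) : Int) + 1 = ((m : Int) + 1) + 1 := by push_cast; ring
    rw [h1, PySem.List.pyRange_one_succ_right (by omega), List.foldl_append,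
      ih (by omega)]
    simp only [List.foldl_cons, List.foldl_nil]
    have hJ : ((m : Int) + 1) = ((m + 1 : Nat) : Int) := by push_cast; ring
    have hval : PySem.List.pyGetD data (((m : Int) + 1) - 1) 0 = pvWsum data (m + 1) (m + 1) := by
      have : ((m : Int) + 1) - 1 = ((m : Nat) : Int) := by ring
      rw [this, PySem.List.pyGetD_natCast, pvWsum_diag]
      simp
    rw [hval, hJ, pvMset_mk (by omega) (by omega)]
    apply pvMk_congr
    intro a _ b _
    by_cases hab : a = m + 1 ∧ b = m + 1
    · obtain ⟨ha1, hb1⟩ := hab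
      subst ha1; subst hb1
      rw [if_pos ⟨rfl, rfl⟩, if_pos (by omega)]
    · rw [if_neg hab]
      by_cases hc : 1 ≤ a ∧ b = a ∧ a ≤ m
      · rw [if_pos hc, if_pos (by omega)]
      · rw [if_neg hc, if_neg (by omega)]

theorem pvM0_eq {n : Nat} :
    List.replicate (n + 1) (List.replicate (n + 1) (-1 : Int)) = pvMk n (fun _ _ => (-1 : Int)) := by
  unfold pvMk
  apply List.ext_getElem
  · simp
  · intro i h1 h2
    simp [List.getElem_replicate]

theorem pvPrefSpec {data : List Int} {n : Nat} :
    ∀ m : Nat, m ≤ n →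
    (PySem.List.pyRange 1 ((m : Int) + 1) 1).foldl
        (fun p k => PySem.List.pySetD p k
          (PySem.List.pyGetD p (k - 1) 0 + PySem.List.pyGetD data (k - 1) 0))
        (List.replicate (n + 1) (0 : Int))
      = (List.range (n + 1)).map (fun t => if 1 ≤ t ∧ t ≤ m then (data.take t).sum else 0) := by
  intro m
  induction m with
  | zero =>
    intro _
    rw [PySem.List.pyRange_one_eq_nil (by norm_num)]
    simp only [List.foldl_nil]
    apply List.ext_getElem
    · simp
    · intro i h1 h2
      simp only [List.getElem_replicate, List.getElem_map, List.getElem_range]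
      rw [if_neg (by omega)]
  | succ m ih =>
    intro hm
    have h1 : ((m + 1 : Nat) : Int) + 1 = ((m : Int) + 1) + 1 := by push_cast; ring
    rw [h1, PySem.List.pyRange_one_succ_right (by omega), List.foldl_append,
      ih (by omega)]
    simp only [List.foldl_cons, List.foldl_nil]
    have hk : ((m : Int) + 1) - 1 = ((m : Nat) : Int) := by ring
    have hget : PySem.List.pyGetD ((List.range (n + 1)).map
        (fun t => if 1 ≤ t ∧ t ≤ m then (data.take t).sum else 0)) (((m : Int) + 1) - 1) 0
        + PySem.List.pyGetD data (((m : Int) + 1) - 1) 0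
        = (data.take (m + 1)).sum := by
      rw [hk, PySem.List.pyGetD_natCast, PySem.List.pyGetD_natCast,
        pvGetD_map_range (by omega)]
      rcases Nat.eq_zero_or_pos m with h | h
      · subst h; simp [pvTake_succ_sum]
      · rw [if_pos (by omega), ← pvTake_succ_sum]
    have hJ : ((m : Int) + 1) = ((m + 1 : Nat) : Int) := by push_cast; ring
    rw [hget, hJ, PySem.List.pySetD_natCast, pvSet_map_range (by omega)]
    apply List.map_congr_left
    intro t _
    by_cases h1 : t = m + 1
    · rw [if_pos h1, if_pos (by omega), h1]
    · rw [if_neg h1]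
      by_cases h2 : 1 ≤ t ∧ t ≤ m
      · rw [if_pos h2, if_pos (by omega)]
      · rw [if_neg h2, if_neg (by omega)]

theorem pvAlt_eq {data : List Int} {n : Nat} :
    solution_alt data (n : Int)
      = pvMk n (fun j i => if 1 ≤ j ∧ j ≤ i
          then (data.take i).sum - (data.take (j - 1)).sum else -1) := by
  unfold solution_alt
  have hn1 : ((n : Int) + 1).toNat = n + 1 := by omega
  have hn2 : (n : Int) + 1 = ((n + 1 : Nat) : Int) := by push_cast; ring
  rw [hn1, pvPrefSpec n le_rfl, hn2, PySem.List.pyRange_zero_nat]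
  unfold pvMk
  rw [List.map_map]
  apply List.map_congr_left
  intro j hj
  have hjn : j ≤ n := Nat.lt_succ_iff.mp (List.mem_range.mp hj)
  simp only [Function.comp_apply]
  rw [List.map_map]
  apply List.map_congr_left
  intro i hi
  have hin : i ≤ n := Nat.lt_succ_iff.mp (List.mem_range.mp hi)
  simp only [Function.comp_apply]
  by_cases hc : 1 ≤ j ∧ j ≤ i
  · rw [if_pos (by constructor <;> [exact_mod_cast Nat.one_le_cast.mpr hc.1;
      exact_mod_cast Nat.cast_le.mpr hc.2]), if_pos hc]
    have hk : ((j : Int)) - 1 = ((j - 1 : Nat) : Int) := by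
      push_cast [Nat.cast_sub hc.1]; ring
    rw [hk, PySem.List.pyGetD_natCast, PySem.List.pyGetD_natCast,
      pvGetD_map_range (by omega), pvGetD_map_range (by omega)]
    have hi1 : 1 ≤ i := le_trans hc.1 hc.2
    rw [if_pos (by omega)]
    rcases Nat.eq_zero_or_pos (j - 1) with h | h
    · rw [if_neg (by omega), h]
      simp
    · rw [if_pos (by omega)]
  · rw [if_neg ?_, if_neg hc]
    intro hcc
    exact hc ⟨by exact_mod_cast hcc.1, by exact_mod_cast hcc.2⟩

theorem pvMain {data : List Int} {n : Nat} (hnd : ¬ pvBig data n) :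
    solution data (n : Int) = solution_alt data (n : Int) := by
  unfold solution
  have hn1 : ((n : Int) + 1).toNat = n + 1 := by omega
  rw [hn1, pvM0_eq, pvDiagfill n le_rfl]
  have hstart : pvMk n (fun j i => if 1 ≤ j ∧ i = j ∧ j ≤ n then pvWsum data j j else -1)
      = pvMk n (pvH data n 1 0) := by
    apply pvMk_congr
    intro a _ b _
    unfold pvH
    by_cases hc : 1 ≤ a ∧ b = a ∧ a ≤ n
    · rw [if_pos hc, if_pos (by omega)]
      rw [hc.2.1]
    · rw [if_neg hc, if_neg (by omega)]
  rw [hstart, pvOuter hnd n le_rfl, pvAlt_eq]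
  apply pvMk_congr
  intro j hj i hi
  unfold pvH
  by_cases hc : 1 ≤ j ∧ j ≤ i
  · rw [if_pos (by omega), if_pos hc]
    exact (pvTake_diff hc.1 hc.2).symm
  · rw [if_neg (by omega), if_neg hc]

-- every entry strictly above the diagonal of A's matrix stays ≤ the sentinel 2000000000
theorem pvFoldl_min_le {g : Int → Int} :
    ∀ (l : List Int) (C : Int), l.foldl (fun m z => if m > g z then g z else m) C ≤ C := by
  intro l
  induction l with
  | nil => intro C; simp
  | cons x xs ih =>
    intro C
    simp only [List.foldl_cons]
    by_cases hc : C > g x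
    · rw [if_pos hc]
      exact le_trans (ih (g x)) (by omega)
    · rw [if_neg hc]
      exact ih C

theorem pvSolve_le {M : List (List Int)} {j i : Int} : pvSolve M j i ≤ 2000000000 := by
  unfold pvSolve
  exact pvFoldl_min_le _ _

def pvGoodM (n : Nat) (M : List (List Int)) : Prop :=
  ∃ f, M = pvMk n f ∧ ∀ a b : Nat, a < b → b ≤ n → f a b ≤ 2000000000

theorem pvFold_pres {α : Type} {P : List (List Int) → Prop} {step : List (List Int) → α → List (List Int)} :
    ∀ (l : List α) (M : List (List Int)), P M → (∀ M x, x ∈ l → P M → P (step M x)) →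
      P (l.foldl step M) := by
  intro l
  induction l with
  | nil => intro M hM _; exact hM
  | cons x xs ih =>
    intro M hM hstep
    exact ih _ (hstep M x (by simp) hM) (fun M' y hy hM' => hstep M' y (by simp [hy]) hM')

theorem pvGood_mset {n : Nat} {M : List (List Int)} (h : pvGoodM n M) {j i : Nat}
    (hj : j ≤ n) (hi : i ≤ n) {v : Int} (hv : j < i → v ≤ 2000000000) :
    pvGoodM n (pvMset M (j : Int) (i : Int) v) := by
  obtain ⟨f, hMf, hfb⟩ := h
  refine ⟨fun a b => if a = j ∧ b = i then v else f a b, ?_, ?_⟩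
  · rw [hMf, pvMset_mk hj hi]
  · intro a b hab hbn
    simp only []
    by_cases hc : a = j ∧ b = i
    · rw [if_pos hc]
      exact hv (by omega)
    · rw [if_neg hc]
      exact hfb a b hab hbn

theorem pvGood_solution {data : List Int} {n : Nat} : pvGoodM n (solution data (n : Int)) := by
  unfold solution
  have hn1 : ((n : Int) + 1).toNat = n + 1 := by omega
  rw [hn1, pvM0_eq]
  apply pvFold_pres
  · -- the diagonal-fill fold preserves goodness
    apply pvFold_pres
    · exact ⟨fun _ _ => -1, rfl, fun _ _ _ _ => by norm_num⟩
    · intro M x hx hM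
      rw [PySem.List.mem_pyRange_one] at hx
      obtain ⟨hx1, hx2⟩ := hx
      have hxx : x = ((x.toNat : Nat) : Int) := by omega
      rw [hxx]
      exact pvGood_mset hM (by omega) (by omega) (fun hlt => absurd hlt (by omega))
  · -- each diagonal pass preserves goodness
    intro M diag hdiag hM
    rw [PySem.List.mem_pyRange_one] at hdiag
    apply pvFold_pres
    · exact hM
    · intro M' x hx hM'
      rw [PySem.List.mem_pyRange_one] at hx
      have hxx : x = ((x.toNat : Nat) : Int) := by omega
      rw [hxx]
      have hii : diag + ((x.toNat : Nat) : Int) = (((diag.toNat + x.toNat) : Nat) : Int) := by omega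
      rw [hii]
      exact pvGood_mset hM' (by omega) (by omega) (fun _ => pvSolve_le)

theorem pvMk_inj {n : Nat} {f g : Nat → Nat → Int} (h : pvMk n f = pvMk n g)
    {j i : Nat} (hj : j ≤ n) (hi : i ≤ n) : f j i = g j i := by
  have h1 : ((pvMk n f).getD j []).getD i 0 = ((pvMk n g).getD j []).getD i 0 := by rw [h]
  unfold pvMk at h1
  rw [pvGetD_map_range_list (by omega), pvGetD_map_range_list (by omega),
    pvGetD_map_range (by omega), pvGetD_map_range (by omega)] at h1
  exact h1

-- ===== VERDICT (by name: the statement is the Claim_ definition above) =====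
theorem solution_spec : Claim_unchanged_solution := by
  intro data size _ _
  unfold Spec_solution
  intro hnd
  by_cases h0 : 0 ≤ size
  · obtain ⟨n, rfl⟩ : ∃ n : Nat, size = (n : Int) := ⟨size.toNat, by omega⟩
    have hb : ¬ pvBig data n := by
      unfold pvBig
      unfold D_solution at hnd
      simpa using hnd
    exact pvMain hb
  · have h1 : PySem.List.pyRange 1 (size + 1) 1 = [] :=
      PySem.List.pyRange_one_eq_nil (by omega)
    have h2 : PySem.List.pyRange 0 (size + 1) 1 = [] :=
      PySem.List.pyRange_one_eq_nil (by omega)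
    have h3 : (size + 1).toNat = 0 := by omega
    unfold solution solution_alt
    rw [h1, h2, h3]
    simp

theorem solution_changed : Claim_changed_solution := by
  unfold Claim_changed_solution; decide

theorem solution_tight : Claim_exact_solution := by
  intro data size _ _ hD heq
  obtain ⟨a, ha, b, hb, hab, hsum⟩ := hD
  have h0 : 0 ≤ size := by omega
  obtain ⟨n, rfl⟩ : ∃ n : Nat, size = (n : Int) := ⟨size.toNat, by omega⟩
  have han : a < n := by omega
  have hbn : b + 1 ≤ n := by omega
  obtain ⟨f, hMf, hfb⟩ := pvGood_solution (data := data) (n := n)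
  rw [hMf, pvAlt_eq] at heq
  have hcell := pvMk_inj heq (j := a + 1) (i := b + 1) (by omega) (by omega)
  have hA : f (a + 1) (b + 1) ≤ 2000000000 := hfb (a + 1) (b + 1) (by omega) (by omega)
  rw [if_pos (by omega), pvTake_diff (by omega) (by omega)] at hcell
  unfold pvWsum at hcell
  have harith : b + 1 + 1 - (a + 1) = b - a + 1 := by omega
  have ha1 : a + 1 - 1 = a := by omega
  rw [harith, ha1] at hcell
  omega
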